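-- pv_equiv track=rewrite | github.com/yeonnseok/ps-algorithm | 2019 baekjoon/BruteForce/1748_relayNumber1.py | solve
-- ===== SOURCE A (Python) =====
-- def solve(n):
--     count = 0
--     i, j = 1, 1
--     while i <= n:
--         if len(str(i)) > len(str(i - 1)):
--             j += 1
--         if i < 10 ** j:
--             count += j
--         i += 1
--     return count
-- ===== SOURCE B (Python) =====
-- def solve(n):
--     # total digits of 1..n = sum over powers p=10^k <= n of (n - p + 1),
--     # since a number i contributes one digit for each power of ten <= i.
--     total = 0
--     p = 1
--     while p <= n:
--         total += n - p + 1
--         p *= 10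
--     return total
-- ===== Notes on version B (the rewrite author's own statement) =====
-- stated objective: faster
-- what changed: Replaced the per-number loop that adds len(str(i)) for every i in 1..n by an O(log n) loop over powers of ten using the identity sum of digit-lengths of 1..n = sum over powers p=10^k<=n of (n-p+1).
import Mathlib
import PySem

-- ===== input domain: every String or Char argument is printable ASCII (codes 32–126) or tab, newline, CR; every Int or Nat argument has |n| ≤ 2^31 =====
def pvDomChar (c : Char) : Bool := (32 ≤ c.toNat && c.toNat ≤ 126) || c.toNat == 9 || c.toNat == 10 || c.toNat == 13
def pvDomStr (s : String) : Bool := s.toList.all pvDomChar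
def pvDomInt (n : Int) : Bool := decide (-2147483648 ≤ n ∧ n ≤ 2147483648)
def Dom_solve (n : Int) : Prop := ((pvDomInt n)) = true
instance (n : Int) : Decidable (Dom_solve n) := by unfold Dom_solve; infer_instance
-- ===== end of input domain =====

-- B replaces A's per-number digit-length loop by an O(log n) sum over powers of ten (objective: faster).

-- ===== PORT A =====
-- j after the first `if` of A's loop body (a named helper so the updated j is shared, as in the Python)
def nextJ (i j : Int) : Int :=
  if PySem.Str.len (PySem.Int.toStr i) > PySem.Str.len (PySem.Int.toStr (i - 1)) then j + 1 else j

-- A's while-loop over state (count, i, j); `10 ** j` is ported as `(10:Int) ^ j.toNat` (exact here: j starts at 1 and only grows)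
def solveLoop (n count i j : Int) : Int :=
  if _h : i ≤ n then
    solveLoop n (if i < (10 : Int) ^ (nextJ i j).toNat then count + nextJ i j else count) (i + 1) (nextJ i j)
  else count
termination_by (n + 1 - i).toNat
decreasing_by omega

def solve (n : Int) : Int := solveLoop n 0 1 1

-- ===== PORT B =====
-- B's while-loop over state (total, p); the proof argument 1 ≤ p only justifies termination (p is always ≥ 1)
def altLoop (n total p : Int) (hp : 1 ≤ p) : Int :=
  if _h : p ≤ n then altLoop n (total + (n - p + 1)) (p * 10) (by omega) else total
termination_by (n + 1 - p).toNat
decreasing_by omega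

def solve_alt (n : Int) : Int := altLoop n 0 1 (by norm_num)

-- ===== PRECONDITION & SPEC =====
def Spec_solve (n : Int) (out : Int) : Prop := out = solve_alt n
instance (n : Int) (out : Int) : Decidable (Spec_solve n out) := by unfold Spec_solve; infer_instance

-- ===== CLAIM (what is proved, stated in full; the proofs are below) =====
def Claim_equal_solve : Prop := ∀ (n : Int), Dom_solve n → Spec_solve n (solve n)

-- ===== LEMMAS AND PROOFS =====

lemma tdc_len : ∀ (f n : Nat) (l : List Char), n < f →
    (Nat.toDigitsCore 10 f n l).length = Nat.log 10 n + 1 + l.length := by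
  intro f
  induction f with
  | zero => omega
  | succ f ih =>
    intro n l hn
    rw [Nat.toDigitsCore]
    by_cases h : n / 10 = 0
    · have hlog : Nat.log 10 n = 0 := Nat.log_eq_zero_iff.mpr (by omega)
      simp [h, hlog]; omega
    · have h10 : 10 ≤ n := by omega
      have hrec : n / 10 < f := by
        have := Nat.div_lt_self (by omega : 0 < n) (by norm_num : 1 < 10)
        omega
      rw [if_neg h, ih (n / 10) _ hrec]
      have : Nat.log 10 n = Nat.log 10 (n / 10) + 1 := by
        have h1 : Nat.log 10 (n / 10) = Nat.log 10 n - 1 := Nat.log_div_base 10 n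
        have h2 : 0 < Nat.log 10 n := Nat.log_pos (by norm_num) h10
        omega
      rw [this]
      simp only [List.length_cons]
      omega

lemma toDigits_len10 (n : Nat) : (Nat.toDigits 10 n).length = Nat.log 10 n + 1 := by
  have := tdc_len (n + 1) n [] (by omega)
  simpa [Nat.toDigits] using this

def dLen (n : Int) : Int := (Nat.log 10 n.toNat : Int) + 1

lemma strlen_toStr (i : Int) (h : 0 ≤ i) : PySem.Str.len (PySem.Int.toStr i) = dLen i := by
  have hlt : ¬ i < 0 := by omega
  simp [PySem.Str.len, PySem.Int.toList_toStr, PySem.Int.toChars, hlt, toDigits_len10, dLen]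

lemma log_pred_le (m : Nat) : Nat.log 10 m ≤ Nat.log 10 (m - 1) + 1 := by
  rcases Nat.lt_or_ge m 2 with h | h
  · interval_cases m <;> simp
  · have h1 : m ≤ (m - 1) * 10 := by omega
    calc Nat.log 10 m ≤ Nat.log 10 ((m - 1) * 10) := Nat.log_mono_right h1
      _ = Nat.log 10 (m - 1) + 1 := Nat.log_mul_base (by norm_num) (by omega)


lemma nextJ_dLen (i : Int) (h : 1 ≤ i) : nextJ i (dLen (i - 1)) = dLen i := by
  have h1 : PySem.Str.len (PySem.Int.toStr i) = dLen i := strlen_toStr i (by omega)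
  have h2 : PySem.Str.len (PySem.Int.toStr (i - 1)) = dLen (i - 1) := strlen_toStr (i - 1) (by omega)
  have hsub : (i - 1).toNat = i.toNat - 1 := by omega
  have hmono : Nat.log 10 ((i - 1).toNat) ≤ Nat.log 10 i.toNat :=
    Nat.log_mono_right (by omega)
  have hle : Nat.log 10 i.toNat ≤ Nat.log 10 ((i - 1).toNat) + 1 := by
    rw [hsub]; exact log_pred_le i.toNat
  unfold nextJ
  rw [h1, h2]
  unfold dLen
  split_ifs with hgt <;> omega

lemma lt_pow_dLen (i : Int) (h : 1 ≤ i) : i < (10 : Int) ^ (dLen i).toNat := by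
  have h1 : (dLen i).toNat = Nat.log 10 i.toNat + 1 := by unfold dLen; omega
  have h2 : i.toNat < 10 ^ (Nat.log 10 i.toNat + 1) := Nat.lt_pow_succ_log_self (by norm_num) _
  rw [h1]
  have := (Int.toNat_of_nonneg (by omega : (0:Int) ≤ i))
  calc i = (i.toNat : Int) := this.symm
    _ < ((10 ^ (Nat.log 10 i.toNat + 1) : Nat) : Int) := by exact_mod_cast h2
    _ = (10 : Int) ^ (Nat.log 10 i.toNat + 1) := by push_cast; ring

def S : Nat → Int
  | 0 => 0
  | m + 1 => S m + dLen (m + 1)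

lemma S_succ (i : Int) (h : 1 ≤ i) : S i.toNat = S (i - 1).toNat + dLen i := by
  have h1 : i.toNat = (i - 1).toNat + 1 := by omega
  have h2 : (((i - 1).toNat + 1 : Nat) : Int) = i := by omega
  rw [h1, S]
  push_cast at h2 ⊢
  rw [h2]


lemma loopA (n : Int) : ∀ (k : Nat) (count i j : Int), (n + 1 - i).toNat = k →
    1 ≤ i → i ≤ n + 1 → j = dLen (i - 1) →
    solveLoop n count i j = count + (S n.toNat - S (i - 1).toNat) := by
  intro k
  induction k using Nat.strong_induction_on with
  | _ k ih =>
    intro count i j hk h1 h2 hj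
    rw [solveLoop]
    by_cases hle : i ≤ n
    · rw [dif_pos hle]
      have hj' : nextJ i j = dLen i := by rw [hj]; exact nextJ_dLen i h1
      have hcond : i < (10 : Int) ^ (nextJ i j).toNat := by rw [hj']; exact lt_pow_dLen i h1
      rw [if_pos hcond]
      have hrec := ih ((n + 1 - (i + 1)).toNat) (by omega) (count + nextJ i j) (i + 1) (nextJ i j)
        rfl (by omega) (by omega) (by rw [hj']; norm_num)
      rw [hrec]
      have hS : S i.toNat = S (i - 1).toNat + dLen i := S_succ i h1
      have : (i + 1 - 1) = i := by ring
      rw [this, hj']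
      omega
    · rw [dif_neg hle]
      have : i - 1 = n := by omega
      rw [this]
      omega


def acc (n p : Int) (hp : 1 ≤ p) : Int :=
  if _h : p ≤ n then (n - p + 1) + acc n (p * 10) (by omega) else 0
termination_by (n + 1 - p).toNat
decreasing_by omega

def cnt (n p : Int) (hp : 1 ≤ p) : Int :=
  if _h : p ≤ n then 1 + cnt n (p * 10) (by omega) else 0
termination_by (n + 1 - p).toNat
decreasing_by omega

lemma alt_eq_acc (n : Int) : ∀ (k : Nat) (total p : Int) (hp : 1 ≤ p), (n + 1 - p).toNat = k →
    altLoop n total p hp = total + acc n p hp := by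
  intro k
  induction k using Nat.strong_induction_on with
  | _ k ih =>
    intro total p hp hk
    rw [altLoop, acc]
    by_cases h : p ≤ n
    · rw [dif_pos h, dif_pos h, ih ((n + 1 - p * 10).toNat) (by omega) _ _ _ rfl]
      ring
    · rw [dif_neg h, dif_neg h]; ring

lemma acc_rec (n : Int) : ∀ (k : Nat) (p : Int) (hp : 1 ≤ p), (n + 1 - p).toNat = k →
    acc n p hp = acc (n - 1) p hp + cnt n p hp := by
  intro k
  induction k using Nat.strong_induction_on with
  | _ k ih =>
    intro p hp hk
    by_cases h : p ≤ n
    · rw [acc, dif_pos h, cnt, dif_pos h,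
        ih ((n + 1 - p * 10).toNat) (by omega) (p * 10) (by omega) rfl]
      by_cases h2 : p ≤ n - 1
      · conv_rhs => rw [acc, dif_pos h2]
        ring
      · -- p = n; then p*10 > n-1 and p*10 > n... p*10 ≥ 10 > n could be false if n large? p=n so p*10=10n>n since n≥1
        have hpn : p = n := by omega
        have h3 : ¬ p * 10 ≤ n - 1 := by nlinarith
        have h4 : ¬ p * 10 ≤ n := by nlinarith
        conv_rhs => rw [acc, dif_neg h2]
        rw [acc, dif_neg h3]
        have hc : n - p + 1 = 1 := by omega
        rw [hc]; ring
    · have h2 : ¬ p ≤ n - 1 := by omega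
      rw [acc, dif_neg h]
      conv_rhs => rw [acc, dif_neg h2]
      rw [cnt, dif_neg h]
      ring

lemma cnt_char (n : Int) : ∀ (k : Nat) (p : Int) (hp : 1 ≤ p), (n + 1 - p).toNat = k → p ≤ n →
    cnt n p hp = (Nat.log 10 (n.toNat / p.toNat) : Int) + 1 := by
  intro k
  induction k using Nat.strong_induction_on with
  | _ k ih =>
    intro p hp hk hpn
    rw [cnt, dif_pos hpn]
    by_cases h : p * 10 ≤ n
    · rw [ih ((n + 1 - p * 10).toNat) (by omega) (p * 10) (by omega) rfl h]
      have e1 : (p * 10).toNat = p.toNat * 10 := by omega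
      have e2 : n.toNat / (p.toNat * 10) = n.toNat / p.toNat / 10 := by
        rw [Nat.div_div_eq_div_mul]
      have h10 : 10 ≤ n.toNat / p.toNat := by
        have : p.toNat * 10 ≤ n.toNat := by omega
        exact (Nat.le_div_iff_mul_le (by omega)).mpr (by omega)
      have hlog : Nat.log 10 (n.toNat / p.toNat) = Nat.log 10 (n.toNat / p.toNat / 10) + 1 := by
        have ha : Nat.log 10 (n.toNat / p.toNat / 10) = Nat.log 10 (n.toNat / p.toNat) - 1 :=
          Nat.log_div_base 10 _
        have hb : 0 < Nat.log 10 (n.toNat / p.toNat) := Nat.log_pos (by norm_num) h10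
        omega
      rw [e1, e2, hlog]
      push_cast; ring
    · rw [cnt, dif_neg h]
      have hq : n.toNat / p.toNat < 10 := by
        rw [Nat.div_lt_iff_lt_mul (by omega)]; omega
      have h1 : 0 < n.toNat / p.toNat := Nat.div_pos (by omega) (by omega)
      have : Nat.log 10 (n.toNat / p.toNat) = 0 := Nat.log_eq_zero_iff.mpr (by omega)
      rw [this]
      norm_num

lemma cnt_one (n : Int) (h : 1 ≤ n) : cnt n 1 (by norm_num) = dLen n := by
  rw [cnt_char n ((n + 1 - 1).toNat) 1 (by norm_num) rfl h]
  simp [dLen]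

lemma S_eq_acc : ∀ (m : Nat) (n : Int), n.toNat = m → S n.toNat = acc n 1 (by norm_num) := by
  intro m
  induction m with
  | zero =>
    intro n hn
    rw [hn, acc, dif_neg (by omega : ¬ (1:Int) ≤ n)]
    rfl
  | succ m ihm =>
    intro n hn
    have h1 : 1 ≤ n := by omega
    rw [S_succ n h1, acc_rec n ((n + 1 - 1).toNat) 1 (by norm_num) rfl, cnt_one n h1,
      ihm (n - 1) (by omega)]

-- ===== VERDICT (by name: the statement is the Claim_ definition above) =====
theorem solve_spec : Claim_equal_solve := by
  unfold Claim_equal_solve Spec_solve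
  intro n _
  unfold solve solve_alt
  rw [alt_eq_acc n ((n + 1 - 1).toNat) 0 1 (by norm_num) rfl]
  by_cases hn : 0 ≤ n
  · have hd0 : (1 : Int) = dLen (1 - 1) := by simp [dLen]
    rw [loopA n ((n + 1 - 1).toNat) 0 1 1 rfl le_rfl (by omega) hd0]
    have hS : S n.toNat = acc n 1 (by norm_num) := S_eq_acc n.toNat n rfl
    have h0 : ((1 : Int) - 1).toNat = 0 := rfl
    rw [h0, hS]
    show 0 + (acc n 1 _ - S 0) = 0 + acc n 1 _
    rw [show S 0 = 0 from rfl]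
    ring
  · rw [solveLoop, dif_neg (by omega : ¬ (1:Int) ≤ n), acc, dif_neg (by omega : ¬ (1:Int) ≤ n)]
    norm_num
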